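-- pv_equiv track=rewrite | github.com/robotslacker/sqlcli | testcli/apiparse.py | APIFormatWithPrefix
-- ===== SOURCE A (Python) =====
-- def APIFormatWithPrefix(p_szCommentSQLScript, p_szOutputPrefix=""):
--     # 如果是完全空行的内容，则跳过
--     if len(p_szCommentSQLScript) == 0:
--         return None
--
--     # 把所有的SQL换行, 第一行加入[API >]， 随后加入[   >]
--     m_FormattedString = None
--     m_CommentSQLLists = p_szCommentSQLScript.split('\n')
--     if len(p_szCommentSQLScript) >= 1:
--         # 如果原来的内容最后一个字符就是回车换行符，split函数会在后面补一个换行符，这里要去掉，否则前端显示就会多一个空格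
--         if p_szCommentSQLScript[-1] == "\n":
--             del m_CommentSQLLists[-1]
--
--     # 拼接字符串
--     bSQLPrefix = 'API> '
--     for pos in range(0, len(m_CommentSQLLists)):
--         if pos == 0:
--             m_FormattedString = p_szOutputPrefix + bSQLPrefix + m_CommentSQLLists[pos]
--         else:
--             m_FormattedString = \
--                 m_FormattedString + '\n' + p_szOutputPrefix + bSQLPrefix + m_CommentSQLLists[pos]
--         if len(m_CommentSQLLists[pos].strip()) != 0:
--             bSQLPrefix = '   > '
--     return m_FormattedString
-- ===== SOURCE B (Python) =====
-- def APIFormatWithPrefix(p_szCommentSQLScript, p_szOutputPrefix=""):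
--     if len(p_szCommentSQLScript) == 0:
--         return None
--     lines = p_szCommentSQLScript.split('\n')
--     if p_szCommentSQLScript[-1] == '\n':
--         del lines[-1]
--     # index of the first non-blank line (None if every line is blank)
--     boundary = next((i for i, line in enumerate(lines) if line.strip()), None)
--     return '\n'.join(
--         p_szOutputPrefix + ('API> ' if boundary is None or i <= boundary else '   > ') + line
--         for i, line in enumerate(lines))
-- ===== Notes on version B (the rewrite author's own statement) =====
-- stated objective: simpler
-- what changed: Replaces the mutable prefix flag threaded through a single stateful string-concatenation loop by first locating the boundary (index of the first non-blank line) and then rebuilding every output line uniformly with a computed prefix and one newline-join.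
import Mathlib
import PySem

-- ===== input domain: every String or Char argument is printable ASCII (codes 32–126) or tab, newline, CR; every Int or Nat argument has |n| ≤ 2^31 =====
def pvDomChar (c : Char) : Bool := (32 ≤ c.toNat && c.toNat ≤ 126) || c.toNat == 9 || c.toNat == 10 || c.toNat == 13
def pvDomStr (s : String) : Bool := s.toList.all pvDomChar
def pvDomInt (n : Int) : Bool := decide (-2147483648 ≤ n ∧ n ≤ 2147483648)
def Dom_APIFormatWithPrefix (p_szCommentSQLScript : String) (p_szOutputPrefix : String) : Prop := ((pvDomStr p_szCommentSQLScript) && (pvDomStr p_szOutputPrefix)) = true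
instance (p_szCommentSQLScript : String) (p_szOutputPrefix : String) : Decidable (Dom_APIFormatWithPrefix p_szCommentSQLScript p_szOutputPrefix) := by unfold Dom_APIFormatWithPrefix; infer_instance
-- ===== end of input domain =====

-- B replaces A's stateful concatenation loop with boundary-then-uniform-rebuild; return values proved equal.

-- ===== PORT A =====
-- literal port of A: split on '\n', drop a trailing empty piece, then one loop over
-- positions threading (formatted-so-far : Option, current prefix) exactly as the Python does
def APIFormatWithPrefix (p_szCommentSQLScript : String) (p_szOutputPrefix : String) : Option String :=
  if p_szCommentSQLScript.toList.length == 0 then none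
  else
    (((PySem.List.enumerate
        (if 1 ≤ p_szCommentSQLScript.toList.length then
           if PySem.List.pyGet? p_szCommentSQLScript.toList (-1) == some '\n' then
             (PySem.Chars.splitOn p_szCommentSQLScript.toList ['\n']).dropLast
           else PySem.Chars.splitOn p_szCommentSQLScript.toList ['\n']
         else PySem.Chars.splitOn p_szCommentSQLScript.toList ['\n']) 0).foldl
      (fun (st : Option (List Char) × List Char) il =>
        (if il.1 == 0 then some (p_szOutputPrefix.toList ++ st.2 ++ il.2)
         else some (st.1.getD [] ++ '\n' :: (p_szOutputPrefix.toList ++ st.2 ++ il.2)),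
         if (PySem.Chars.strip il.2).length != 0 then "   > ".toList else st.2))
      (none, "API> ".toList)).1).map String.ofList

-- ===== PORT B =====
-- literal port of B: same split/trim, then find the boundary (first non-blank line) and
-- join the uniformly rebuilt lines; pvPrefix is B's inline conditional
-- 'API> ' if boundary is None or i <= boundary else '   > '
def pvPrefix (boundary : Option Int) (i : Int) : List Char :=
  match boundary with
  | none => "API> ".toList
  | some b => if i ≤ b then "API> ".toList else "   > ".toList

def pvLines (s : List Char) : List (List Char) :=
  if PySem.List.pyGet? s (-1) == some '\n' then (PySem.Chars.splitOn s ['\n']).dropLast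
  else PySem.Chars.splitOn s ['\n']

def APIFormatWithPrefix_alt (p_szCommentSQLScript : String) (p_szOutputPrefix : String) : Option String :=
  if p_szCommentSQLScript.toList.length == 0 then none
  else
    some (String.ofList (PySem.Chars.join ['\n']
      ((PySem.List.enumerate (pvLines p_szCommentSQLScript.toList) 0).map (fun il =>
        p_szOutputPrefix.toList ++
          pvPrefix (((PySem.List.enumerate (pvLines p_szCommentSQLScript.toList) 0).find?
              (fun jl => (PySem.Chars.strip jl.2).length != 0)).map (·.1)) il.1 ++ il.2))))

-- ===== PRECONDITION & SPEC =====
def Spec_APIFormatWithPrefix (p_szCommentSQLScript : String) (p_szOutputPrefix : String) (out : Option String) : Prop := out = APIFormatWithPrefix_alt p_szCommentSQLScript p_szOutputPrefix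
instance (p_szCommentSQLScript : String) (p_szOutputPrefix : String) (out : Option String) : Decidable (Spec_APIFormatWithPrefix p_szCommentSQLScript p_szOutputPrefix out) := by unfold Spec_APIFormatWithPrefix; infer_instance

-- ===== CLAIM (what is proved, stated in full; the proofs are below) =====
def Claim_equal_APIFormatWithPrefix : Prop := ∀ (p_szCommentSQLScript : String) (p_szOutputPrefix : String), Dom_APIFormatWithPrefix p_szCommentSQLScript p_szOutputPrefix → Spec_APIFormatWithPrefix p_szCommentSQLScript p_szOutputPrefix (APIFormatWithPrefix p_szCommentSQLScript p_szOutputPrefix)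

-- ===== LEMMAS AND PROOFS =====

-- the common rendering both programs compute: each line prefixed with p ++ (API>/   >),
-- the prefix switching permanently after the first non-blank line
def pvRender (p : List Char) (seen : Bool) : List (List Char) → List (List Char)
  | [] => []
  | l :: ls => (p ++ (if seen then "   > ".toList else "API> ".toList) ++ l)
      :: pvRender p (seen || ((PySem.Chars.strip l).length != 0)) ls

-- splitOn.go returns at least acc.length + 1 pieces
theorem pvGoLen (sep : List Char) (fuel : Nat) (l cur : List Char) (acc : List (List Char)) :
    acc.length + 1 ≤ (PySem.Chars.splitOn.go sep fuel l cur acc).length := by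
  induction fuel generalizing l cur acc with
  | zero => simp [PySem.Chars.splitOn.go]
  | succ n ih =>
    cases l with
    | nil => simp [PySem.Chars.splitOn.go]
    | cons c rest =>
      rw [PySem.Chars.splitOn.go]
      split
      · exact le_trans (by simp) (ih _ _ _)
      · exact ih _ _ _

theorem pvSplitOn_ne_nil (s sep : List Char) : PySem.Chars.splitOn s sep ≠ [] := by
  have h := pvGoLen sep (s.length + 1) s [] []
  intro hnil
  unfold PySem.Chars.splitOn at hnil
  simp [hnil] at h

-- if '\n' occurs in l, the split has at least acc.length + 2 pieces
theorem pvGoLen2 (fuel : Nat) (l cur : List Char) (acc : List (List Char))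
    (hm : '\n' ∈ l) (hf : l.length < fuel) :
    acc.length + 2 ≤ (PySem.Chars.splitOn.go ['\n'] fuel l cur acc).length := by
  induction fuel generalizing l cur acc with
  | zero => omega
  | succ n ih =>
    cases l with
    | nil => simp at hm
    | cons c rest =>
      rw [PySem.Chars.splitOn.go]
      by_cases hc : c = '\n'
      · have hp : List.isPrefixOf ['\n'] (c :: rest) = true := by
          simp [List.isPrefixOf, hc]
        rw [if_pos hp]
        exact le_trans (by simp) (pvGoLen _ _ _ _ _)
      · have hp : List.isPrefixOf ['\n'] (c :: rest) = false := by
          simp [List.isPrefixOf]; exact fun h => hc h.symm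
        rw [hp]
        simp only [Bool.false_eq_true, if_false]
        have hm' : '\n' ∈ rest := by
          cases hm with
          | head => exact absurd rfl hc
          | tail _ h => exact h
        exact ih _ _ _ hm' (by simp at hf ⊢; omega)

theorem pvSplit_drop_ne_nil (s : List Char) (h : '\n' ∈ s) :
    (PySem.Chars.splitOn s ['\n']).dropLast ≠ [] := by
  have h2 := pvGoLen2 (s.length + 1) s [] [] h (by omega)
  unfold PySem.Chars.splitOn
  intro hnil
  have hlen : (PySem.Chars.splitOn.go ['\n'] (s.length + 1) s [] []).length - 1 = 0 := by
    rw [← List.length_dropLast, hnil]; rfl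
  simp at h2
  omega

theorem pvMem_pyGet_neg_one (xs : List Char) (a : Char)
    (h : PySem.List.pyGet? xs (-1) = some a) : a ∈ xs := by
  unfold PySem.List.pyGet? at h
  cases hk : PySem.List.pyIdx? xs.length (-1) with
  | none => rw [hk] at h; simp at h
  | some k => rw [hk] at h; simp only [Option.bind_some] at h; exact List.mem_of_getElem? h

-- index ≥ start for every element of enumerate
theorem pvEnum_fst_ge {α : Type} (ls : List α) (k : Int) :
    ∀ il ∈ PySem.List.enumerate ls k, k ≤ il.1 := by
  induction ls generalizing k with
  | nil => simp [PySem.List.enumerate_nil]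
  | cons l ls ih =>
    intro il hmem
    rw [PySem.List.enumerate_cons] at hmem
    rcases List.mem_cons.mp hmem with h | h
    · simp [h]
    · have := ih (k + 1) il h; omega

-- A's fold, started after the first line, appends '\n'-separated rendered lines
theorem pvFoldA (p : List Char) (ls : List (List Char)) (k : Int) (hk : 1 ≤ k)
    (acc : List Char) (seen : Bool) :
    (PySem.List.enumerate ls k).foldl
      (fun (st : Option (List Char) × List Char) il =>
        (if il.1 == 0 then some (p ++ st.2 ++ il.2)
         else some (st.1.getD [] ++ '\n' :: (p ++ st.2 ++ il.2)),
         if (PySem.Chars.strip il.2).length != 0 then "   > ".toList else st.2))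
      (some acc, if seen then "   > ".toList else "API> ".toList)
    = (some (acc ++ (pvRender p seen ls).flatMap (fun x => '\n' :: x)),
       if ls.foldl (fun b l => b || ((PySem.Chars.strip l).length != 0)) seen
       then "   > ".toList else "API> ".toList) := by
  induction ls generalizing k acc seen with
  | nil => simp [PySem.List.enumerate_nil, pvRender]
  | cons l ls ih =>
    rw [PySem.List.enumerate_cons, List.foldl_cons]
    have h0 : (k == 0) = false := by simp; omega
    have hpre : (if (PySem.Chars.strip l).length != 0 then "   > ".toList
                 else if seen then "   > ".toList else "API> ".toList)
        = if (seen || ((PySem.Chars.strip l).length != 0)) then "   > ".toList else "API> ".toList := by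
      cases seen <;> cases h : ((PySem.Chars.strip l).length != 0) <;> simp_all
    simp only [h0, Bool.false_eq_true, if_false]
    rw [show (if (PySem.Chars.strip l).length != 0 then "   > ".toList
              else if seen then "   > ".toList else "API> ".toList) = _ from hpre]
    rw [ih (k + 1) (by omega)]
    simp [pvRender, List.foldl_cons]

-- B's prefixed map, once a non-blank line was already seen (boundary strictly before k)
theorem pvMapSeen (p : List Char) (ls : List (List Char)) (k b : Int) (hb : b < k) :
    (PySem.List.enumerate ls k).map (fun il => p ++ pvPrefix (some b) il.1 ++ il.2)
    = pvRender p true ls := by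
  induction ls generalizing k with
  | nil => simp [PySem.List.enumerate_nil, pvRender]
  | cons l ls ih =>
    rw [PySem.List.enumerate_cons, List.map_cons, ih (k + 1) (by omega)]
    have hkb : ¬ (k ≤ b) := by omega
    simp [pvRender, pvPrefix, hkb]

-- B's prefixed map before any non-blank line, with the boundary taken on the suffix
theorem pvMapUnseen (p : List Char) (ls : List (List Char)) (k : Int) (B0 : Option Int)
    (hB : B0 = ((PySem.List.enumerate ls k).find?
        (fun il => (PySem.Chars.strip il.2).length != 0)).map (·.1)) :
    (PySem.List.enumerate ls k).map (fun il => p ++ pvPrefix B0 il.1 ++ il.2)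
    = pvRender p false ls := by
  induction ls generalizing k B0 with
  | nil => simp [PySem.List.enumerate_nil, pvRender]
  | cons l ls ih =>
    rw [PySem.List.enumerate_cons, List.map_cons]
    rw [PySem.List.enumerate_cons] at hB
    by_cases hnb : ((PySem.Chars.strip l).length != 0) = true
    · rw [List.find?_cons_of_pos (by simpa using hnb)] at hB
      simp only [Option.map_some] at hB
      subst hB
      have hhead : pvPrefix (some ((k, l)).1) k = "API> ".toList := by simp [pvPrefix]
      rw [show ((k, l)).1 = k from rfl] at hhead ⊢
      rw [hhead, pvMapSeen p ls (k + 1) k (by omega)]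
      simp [pvRender, hnb]
    · rw [List.find?_cons_of_neg (by simpa using hnb)] at hB
      have hnb' : ((PySem.Chars.strip l).length != 0) = false := by simpa using hnb
      have hhead : pvPrefix B0 k = "API> ".toList := by
        cases hf : (PySem.List.enumerate ls (k+1)).find?
            (fun il => (PySem.Chars.strip il.2).length != 0) with
        | none => rw [hf] at hB; simp at hB; simp [hB, pvPrefix]
        | some il =>
          rw [hf] at hB
          simp only [Option.map_some] at hB
          have hmem := List.mem_of_find?_eq_some hf
          have := pvEnum_fst_ge ls (k+1) il hmem
          have hkb : k ≤ il.1 := by omega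
          simp [hB, pvPrefix, hkb]
      rw [hhead, ih (k + 1) B0 hB]
      simp [pvRender, hnb']

-- '\n'.join of a nonempty list as head ++ flatMap
theorem pvJoin_eq (x : List Char) (xs : List (List Char)) :
    PySem.Chars.join ['\n'] (x :: xs) = x ++ xs.flatMap (fun l => '\n' :: l) := by
  induction xs generalizing x with
  | nil => simp [PySem.Chars.join_singleton]
  | cons y ys ih =>
    rw [PySem.Chars.join_cons_cons, ih]
    simp

-- ===== VERDICT (by name: the statement is the Claim_ definition above) =====
theorem APIFormatWithPrefix_spec : Claim_equal_APIFormatWithPrefix := by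
  intro s p _
  unfold Spec_APIFormatWithPrefix APIFormatWithPrefix APIFormatWithPrefix_alt
  by_cases hz : (s.toList.length == 0) = true
  · rw [if_pos hz, if_pos hz]
  · have hzf : (s.toList.length == 0) = false := by simpa using hz
    have h1 : (1:Nat) ≤ s.toList.length := by
      have hlen : s.toList.length ≠ 0 := fun hh => hz (by simp [hh])
      omega
    simp only [hzf, Bool.false_eq_true, if_false]
    rw [if_pos h1]
    rw [show (if PySem.List.pyGet? s.toList (-1) == some '\n' then
             (PySem.Chars.splitOn s.toList ['\n']).dropLast
           else PySem.Chars.splitOn s.toList ['\n']) = pvLines s.toList from rfl]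
    have hLne : pvLines s.toList ≠ [] := by
      unfold pvLines
      by_cases hlast : (PySem.List.pyGet? s.toList (-1) == some '\n') = true
      · rw [if_pos hlast]
        exact pvSplit_drop_ne_nil _ (pvMem_pyGet_neg_one _ _ (by simpa using hlast))
      · rw [if_neg (by simpa using hlast)]
        exact pvSplitOn_ne_nil _ _
    obtain ⟨x, xs, hxs⟩ := List.exists_cons_of_ne_nil hLne
    rw [hxs]
    rw [PySem.List.enumerate_cons, List.foldl_cons]
    have h00 : ((0:Int) == 0) = true := by simp
    simp only [h00, if_pos]
    have hstep : (if (PySem.Chars.strip x).length != 0 then "   > ".toList else "API> ".toList)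
        = if (false || ((PySem.Chars.strip x).length != 0)) then "   > ".toList
          else "API> ".toList := by simp
    simp only [zero_add]
    rw [hstep,
        pvFoldA p.toList xs 1 (le_refl 1) (p.toList ++ "API> ".toList ++ x)
          (false || ((PySem.Chars.strip x).length != 0))]
    -- B side
    rw [List.map_cons]
    by_cases hnb : ((PySem.Chars.strip x).length != 0) = true
    · rw [List.find?_cons_of_pos (by simpa using hnb)]
      simp only [Option.map_some]
      have hhead : pvPrefix (some (((0:Int), x)).1) ((0:Int), x).1 = "API> ".toList := by
        simp [pvPrefix]
      rw [hhead, pvMapSeen p.toList xs 1 (((0:Int), x)).1 (by simp), pvJoin_eq]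
      simp [hnb]
    · rw [List.find?_cons_of_neg (by simpa using hnb)]
      have hnb' : ((PySem.Chars.strip x).length != 0) = false := by simpa using hnb
      have hhead : pvPrefix (((PySem.List.enumerate xs 1).find?
            (fun jl => (PySem.Chars.strip jl.2).length != 0)).map (·.1)) ((0:Int), x).1
          = "API> ".toList := by
        cases hf : (PySem.List.enumerate xs 1).find?
            (fun jl => (PySem.Chars.strip jl.2).length != 0) with
        | none => simp [pvPrefix]
        | some il =>
          have hmem := List.mem_of_find?_eq_some hf
          have := pvEnum_fst_ge xs 1 il hmem
          simp [pvPrefix]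
          omega
      rw [hhead, pvMapUnseen p.toList xs 1 _ rfl, pvJoin_eq]
      simp [hnb']
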